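-- pv_equiv track=rewrite | github.com/collective/dateable.chronos | dateable/chronos/utils.py | localTimeFormatFromLocalDateTimeFormat
-- ===== SOURCE A (Python) =====
-- def localTimeFormatFromLocalDateTimeFormat(format):
--     """Derive a time-only format from a format string possibly including both time and date tokens.
--
--     Needed because there's no apparent definition of a localized time format string (apart from format strings that mix in date as well) in Plone < 3.2. Algorithm: find each strftime substitution token (like %S) and decide whether it conveys any time information (seconds, minutes, etc.). Keep the time-like tokens, and discard the date-like ones. Also keep any characters between successive time-like tokens. Discard leading and trailing characters.
--     """
--     # TODO: If we end up butting two tokens up against each other, insert a space between them.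
--
--     chunks = format.split('%')[1:]  # Always throw away the first chunk. Whether we keep or discard prefixes and suffixes, we have to do the same for both to support right-to-left and left-to-right languages.
--     kill = 'aAbBdjmUwWxyY'  # date-like tokens
--     limbo = ''  # chars between tokens
--     previousKept = False
--     output = []
--     for c in chunks:
--         try:
--             subst = c[0]  # the char following the %
--         except IndexError:
--             subst = ''
--         if subst not in kill:
--             if previousKept:
--                 output.append(limbo)
--             output.append('%' + subst)
--             try:
--                 limbo = c[1:]
--             except IndexError:
--                 limbo = ''
--             previousKept = True
--         else:
--             previousKept = False
--     return ''.join(output)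
-- ===== SOURCE B (Python) =====
-- def localTimeFormatFromLocalDateTimeFormat(format):
--     """Derive the time-only format: stateless two-phase version (split, then a
--     zip-with-successor comprehension instead of A's previousKept/limbo state loop)."""
--     kill = 'aAbBdjmUwWxyY'
--
--     def kept(c):
--         return bool(c) and c[0] not in kill
--
--     chunks = format.split('%')[1:]
--     pieces = ['%' + c[0] + (c[1:] if kept(nxt) else '')
--               for c, nxt in zip(chunks, chunks[1:] + [''])
--               if kept(c)]
--     return ''.join(pieces)
-- ===== Notes on version B (the rewrite author's own statement) =====
-- stated objective: alternative
-- what changed: Replaces A's single stateful loop (previousKept flag and limbo buffer carried across iterations) by a stateless two-phase form: pair each %-chunk with its successor via zip, and emit per-pair pieces ('%'+head, plus the tail text only when the successor chunk is also kept) in one comprehension.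
import Mathlib
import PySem

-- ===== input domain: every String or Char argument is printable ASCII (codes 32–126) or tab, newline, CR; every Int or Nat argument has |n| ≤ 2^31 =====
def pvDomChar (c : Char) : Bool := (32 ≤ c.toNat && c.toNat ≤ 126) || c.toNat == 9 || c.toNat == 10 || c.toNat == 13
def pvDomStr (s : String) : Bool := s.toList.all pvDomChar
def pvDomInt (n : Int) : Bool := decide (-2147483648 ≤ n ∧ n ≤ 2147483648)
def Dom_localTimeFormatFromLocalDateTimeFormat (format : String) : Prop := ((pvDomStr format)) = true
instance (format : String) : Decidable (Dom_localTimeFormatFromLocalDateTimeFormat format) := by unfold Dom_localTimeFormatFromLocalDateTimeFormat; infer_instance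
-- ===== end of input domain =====

-- B replaces A's stateful loop (previousKept/limbo) by a stateless zip-with-successor comprehension; same cost, no speed claim.

-- ===== PORT A =====
-- literal port of A: split on '%', drop first chunk, stateful fold over (limbo, previousKept, output)
def pvKillA : List Char := "aAbBdjmUwWxyY".toList

def pvStepA (st : List Char × Bool × List (List Char)) (c : List Char) : List Char × Bool × List (List Char) :=
  let subst : List Char := match PySem.List.pyGet? c 0 with
    | some ch => [ch]
    | none => []
  if PySem.Chars.isIn subst pvKillA = false then
    let output := if st.2.1 then st.2.2 ++ [st.1] else st.2.2
    let output := output ++ [['%'] ++ subst]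
    (PySem.List.slice c (some 1) none, true, output)
  else
    (st.1, false, st.2.2)

def localTimeFormatFromLocalDateTimeFormat (format : String) : String :=
  let chunks := (PySem.Chars.splitOn format.toList ['%']).drop 1
  let st := chunks.foldl pvStepA ([], false, [])
  String.ofList (PySem.Chars.join [] st.2.2)

-- ===== PORT B =====
-- literal port of Source B: kept test, zip chunks with successors (padded by ''), comprehension, join
def pvKillB : List Char := "aAbBdjmUwWxyY".toList

def pvKept (c : List Char) : Bool :=
  match c with
  | [] => false
  | ch :: _ => !PySem.Chars.isIn [ch] pvKillB

def pvPieceB (c nxt : List Char) : List (List Char) :=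
  match c with
  | [] => []
  | ch :: rest =>
    if pvKept (ch :: rest) then [['%'] ++ [ch] ++ (if pvKept nxt then rest else [])] else []

def localTimeFormatFromLocalDateTimeFormat_alt (format : String) : String :=
  let chunks := (PySem.Chars.splitOn format.toList ['%']).drop 1
  let pieces := (chunks.zip (chunks.drop 1 ++ [[]])).flatMap (fun p => pvPieceB p.1 p.2)
  String.ofList (PySem.Chars.join [] pieces)


-- ===== PRECONDITION & SPEC =====
def Spec_localTimeFormatFromLocalDateTimeFormat (format : String) (out : String) : Prop := out = localTimeFormatFromLocalDateTimeFormat_alt format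
instance (format : String) (out : String) : Decidable (Spec_localTimeFormatFromLocalDateTimeFormat format out) := by unfold Spec_localTimeFormatFromLocalDateTimeFormat; infer_instance

-- ===== CLAIM (what is proved, stated in full; the proofs are below) =====
def Claim_equal_localTimeFormatFromLocalDateTimeFormat : Prop := ∀ (format : String), Dom_localTimeFormatFromLocalDateTimeFormat format → Spec_localTimeFormatFromLocalDateTimeFormat format (localTimeFormatFromLocalDateTimeFormat format)

-- ===== LEMMAS AND PROOFS =====

-- join with empty separator is flatten
theorem pvJoinNil (xs : List (List Char)) : PySem.Chars.join [] xs = xs.flatten := by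
  induction xs with
  | nil => rfl
  | cons h t ih =>
    cases t with
    | nil => rfl
    | cons d ds => simp_all [PySem.Chars.join, List.intercalate, List.intersperse]

-- the reference right-hand side: per-chunk pieces with successor lookahead
def pvG : List (List Char) → List Char
  | [] => []
  | c :: cs => (pvPieceB c (cs.headD [])).flatten ++ pvG cs

theorem pvZipSucc (cs : List (List Char)) :
    ((cs.zip (cs.drop 1 ++ [[]])).flatMap (fun p => pvPieceB p.1 p.2)).flatten = pvG cs := by
  induction cs with
  | nil => simp [pvG]
  | cons c cs ih =>
    cases cs with
    | nil => simp [pvG, pvG.eq_1]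
    | cons d ds => simp_all [pvG]

-- A's fold invariant: flattened output = old output + pending limbo (iff previous kept AND next chunk kept) + pvG
theorem pvFoldA (cs : List (List Char)) (limbo : List Char) (prev : Bool) (out : List (List Char)) :
    (cs.foldl pvStepA (limbo, prev, out)).2.2.flatten
      = out.flatten ++ (if prev && pvKept (cs.headD []) then limbo else []) ++ pvG cs := by
  induction cs generalizing limbo prev out with
  | nil => simp [pvG, pvKept]
  | cons c cs ih =>
    cases c with
    | nil =>
      have hkept : pvKept ([] : List Char) = false := rfl
      simp only [List.foldl_cons, pvStepA, PySem.List.pyGet?, pvG, pvPieceB]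
      simp [ih, pvKept]
    | cons ch rest =>
      by_cases hk : PySem.Chars.isIn [ch] pvKillA = false
      · have hkept : pvKept (ch :: rest) = true := by
          simp [pvKept, pvKillB, ← pvKillA.eq_1, hk]
        simp only [List.foldl_cons, pvStepA]
        simp only [PySem.List.pyGet?, PySem.List.pyIdx?]
        norm_num [hk, PySem.List.slice_from_one]
        rw [ih]
        cases prev <;> simp [pvG, pvPieceB, hkept, List.headD]
      · have hkept : pvKept (ch :: rest) = false := by
          simp only [pvKept, pvKillB, ← pvKillA.eq_1]
          simp [hk]
        simp only [List.foldl_cons, pvStepA]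
        simp only [PySem.List.pyGet?, PySem.List.pyIdx?]
        norm_num [hk]
        rw [ih]
        simp [pvG, pvPieceB, hkept]

-- ===== VERDICT (by name: the statement is the Claim_ definition above) =====
theorem localTimeFormatFromLocalDateTimeFormat_spec : Claim_equal_localTimeFormatFromLocalDateTimeFormat := by
  intro format _
  show _ = _
  unfold localTimeFormatFromLocalDateTimeFormat localTimeFormatFromLocalDateTimeFormat_alt
  simp only [pvJoinNil]
  rw [pvZipSucc, pvFoldA]
  simp
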